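-- pv_equiv track=rewrite | github.com/ArturRegadas/Competitive_Programming | Beecrowd/2-AD-HOC/1246-Estacionamento-7/1246.py | processa_estacionamento
-- ===== SOURCE A (Python) =====
-- def processa_estacionamento(c, eventos):
--     estacionamento = [0] * c
--     veiculos = {}
--     espacos_livres = [(0, c)]
--     faturamento = 0
--
--     for evento in eventos:
--         dados = evento.split()
--         if dados[0] == 'C':
--             placa, tamanho = int(dados[1]), int(dados[2])
--             posicao = -1
--
--
--             for i, (inicio, comprimento) in enumerate(espacos_livres):
--                 if comprimento >= tamanho:
--                     posicao = inicio
--                     espacos_livres.pop(i)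
--                     if comprimento > tamanho:
--                         espacos_livres.insert(i, (inicio + tamanho, comprimento - tamanho))
--                     break
--
--             if posicao != -1:
--                 for j in range(posicao, posicao + tamanho):
--                     estacionamento[j] = 1
--                 veiculos[placa] = (posicao, tamanho)
--                 faturamento += 10
--
--         elif dados[0] == 'S':
--             placa = int(dados[1])
--             if placa in veiculos:
--                 posicao, tamanho = veiculos.pop(placa)
--                 for j in range(posicao, posicao + tamanho):
--                     estacionamento[j] = 0
--
--
--                 nova_lista = []
--                 inserido = False
--                 for inicio, comprimento in espacos_livres:
--                     if inicio == posicao + tamanho: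
--                         posicao, tamanho = posicao, tamanho + comprimento
--                     elif posicao == inicio + comprimento:
--                         posicao, tamanho = inicio, tamanho + comprimento
--                     else:
--                         nova_lista.append((inicio, comprimento))
--
--                 nova_lista.append((posicao, tamanho))
--                 espacos_livres = sorted(nova_lista)
--
--     return faturamento
-- ===== SOURCE B (Python) =====
-- def processa_estacionamento(c, eventos):
--     ocupados = []      # disjoint (posicao, tamanho) intervals, kept sorted by position
--     veiculos = {}
--     faturamento = 0
--
--     for evento in eventos:
--         dados = evento.split()
--         if dados[0] == 'C':
--             placa, tamanho = int(dados[1]), int(dados[2])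
--             vaga = estaciona(ocupados, c, tamanho)
--             if vaga is not None:
--                 veiculos[placa] = (vaga, tamanho)
--                 faturamento += 10
--         elif dados[0] == 'S':
--             placa = int(dados[1])
--             if placa in veiculos:
--                 ocupados.remove(veiculos.pop(placa))
--
--     return faturamento
--
--
-- def estaciona(ocupados, c, tamanho):
--     # first fit: scan the sorted occupied intervals; the gap before the i-th
--     # interval starts at the previous interval's end; insert at the same index
--     cursor = 0
--     for i, (inicio, tam) in enumerate(ocupados):
--         if inicio - cursor >= tamanho:
--             ocupados.insert(i, (cursor, tamanho))
--             return cursor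
--         cursor = inicio + tam
--     if c - cursor >= tamanho:
--         ocupados.append((cursor, tamanho))
--         return cursor
--     return None
-- ===== Notes on version B (the rewrite author's own statement) =====
-- stated objective: alternative
-- what changed: B drops A's cell array and free-gap list entirely and keeps one sorted list of occupied intervals: first fit reads each gap off that list while scanning it and inserts in place, and a departure is a plain list remove instead of A's unpark-cells + merge-adjacent-gaps + re-sort pass.
-- outside the precondition, e.g. on processa_estacionamento(3, ['C 1 3', 'C 2 0']): A returns 10, B returns 20; on processa_estacionamento(5, ['C 9']): A raises IndexError, B raises IndexError
import Mathlib
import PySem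

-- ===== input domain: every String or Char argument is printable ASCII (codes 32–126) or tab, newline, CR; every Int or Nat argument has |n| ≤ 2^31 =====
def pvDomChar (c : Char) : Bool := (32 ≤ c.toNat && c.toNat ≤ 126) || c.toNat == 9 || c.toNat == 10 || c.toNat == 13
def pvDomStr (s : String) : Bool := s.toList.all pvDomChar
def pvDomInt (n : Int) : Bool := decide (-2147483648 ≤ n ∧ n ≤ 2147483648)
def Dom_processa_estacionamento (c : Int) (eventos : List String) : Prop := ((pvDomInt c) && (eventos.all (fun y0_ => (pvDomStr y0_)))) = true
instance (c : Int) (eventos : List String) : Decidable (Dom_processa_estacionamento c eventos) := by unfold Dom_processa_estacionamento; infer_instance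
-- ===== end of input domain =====

-- B replaces A's three parallel structures (cell array, free-gap list with merge+sort on
-- departure) by ONE sorted list of occupied intervals: first fit reads the gaps off that
-- list while scanning it, departure is a plain remove — no cell writes, no merging, no sort.
-- Objective: alternative (structurally different, similar cost).

-- shared with B: int(dados[i])  (the default is never used under Pre_: parsing succeeds there)
def pvIntAt (dados : List String) (i : Int) : Int :=
  (PySem.Int.ofStr? (PySem.List.pyGetD dados i "")).getD 0

-- ===== PORT A =====

-- the `for i, (inicio, comprimento) in enumerate(espacos_livres)` first-fit loop with
-- pop(i)/insert(i)/break, as structural recursion (pop+insert at i = replace in place);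
-- `none` = Python's `posicao == -1`
def pvFitA : List (Int × Int) → Int → Option (Int × List (Int × Int))
  | [], _ => none
  | (inicio, comprimento) :: resto, tamanho =>
    if comprimento ≥ tamanho then
      some (inicio,
        if comprimento > tamanho then (inicio + tamanho, comprimento - tamanho) :: resto else resto)
    else (pvFitA resto tamanho).map (fun r => (r.1, (inicio, comprimento) :: r.2))

-- body of the departure merge loop building (nova_lista, posicao, tamanho)
def pvMergeStep (acc : List (Int × Int) × Int × Int) (g : Int × Int) : List (Int × Int) × Int × Int :=
  if g.1 = acc.2.1 + acc.2.2 then (acc.1, acc.2.1, acc.2.2 + g.2)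
  else if acc.2.1 = g.1 + g.2 then (acc.1, g.1, acc.2.2 + g.2)
  else (acc.1 ++ [g], acc.2.1, acc.2.2)

-- one event of A's main loop; state = (estacionamento, veiculos, espacos_livres, faturamento)
def pvStepA (c : Int)
    (st : List Int × PySem.Dict Int (Int × Int) × List (Int × Int) × Int) (evento : String) :
    List Int × PySem.Dict Int (Int × Int) × List (Int × Int) × Int :=
  let est := st.1; let veiculos := st.2.1; let espacos := st.2.2.1; let fat := st.2.2.2
  let dados := (PySem.Str.split₀ evento)
  if PySem.List.pyGetD dados 0 "" = "C" then
    let placa := pvIntAt dados 1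
    let tamanho := pvIntAt dados 2
    match pvFitA espacos tamanho with
    | none => st
    | some (posicao, espacos') =>
        let est' := (PySem.List.pyRange posicao (posicao + tamanho) 1).foldl
          (fun e j => PySem.List.pySetD e j 1) est
        (est', veiculos.insert placa (posicao, tamanho), espacos', fat + 10)
  else if PySem.List.pyGetD dados 0 "" = "S" then
    let placa := pvIntAt dados 1
    if veiculos.contains placa then
      match veiculos.get? placa with
      | none => st  -- unreachable: contains = true
      | some pt =>
          let est' := (PySem.List.pyRange pt.1 (pt.1 + pt.2) 1).foldl
            (fun e j => PySem.List.pySetD e j 0) est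
          let r := espacos.foldl pvMergeStep ([], pt.1, pt.2)
          (est', veiculos.erase placa,
           PySem.List.sorted2 (r.1 ++ [(r.2.1, r.2.2)]) (·.1) (·.2) false, fat)
    else st
  else st

def processa_estacionamento (c : Int) (eventos : List String) : Int :=
  (eventos.foldl (pvStepA c) (List.replicate c.toNat 0, PySem.Dict.empty, [(0, c)], 0)).2.2.2

-- ===== PORT B =====

-- estaciona: scan the sorted occupied list; the gap before interval (inicio, tam) starts at
-- `cursor` (end of the previous interval); on a fit, insert at that index (= cons here) and
-- return the position; the trailing gap runs to c.  Returns (vaga, updated list).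
def pvEstaciona (ocupados : List (Int × Int)) (c : Int) (cursor : Int) (tamanho : Int) :
    Option (Int × List (Int × Int)) :=
  match ocupados with
  | [] => if c - cursor ≥ tamanho then some (cursor, [(cursor, tamanho)]) else none
  | (inicio, tam) :: resto =>
      if inicio - cursor ≥ tamanho then
        some (cursor, (cursor, tamanho) :: (inicio, tam) :: resto)
      else (pvEstaciona resto c (inicio + tam) tamanho).map (fun r => (r.1, (inicio, tam) :: r.2))

-- one event of B's main loop; state = (ocupados, veiculos, faturamento)
def pvStepB (c : Int)
    (st : List (Int × Int) × PySem.Dict Int (Int × Int) × Int) (evento : String) :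
    List (Int × Int) × PySem.Dict Int (Int × Int) × Int :=
  let ocupados := st.1; let veiculos := st.2.1; let fat := st.2.2
  let dados := (PySem.Str.split₀ evento)
  if PySem.List.pyGetD dados 0 "" = "C" then
    let placa := pvIntAt dados 1
    let tamanho := pvIntAt dados 2
    match pvEstaciona ocupados c 0 tamanho with
    | none => st
    | some (vaga, ocupados') => (ocupados', veiculos.insert placa (vaga, tamanho), fat + 10)
  else if PySem.List.pyGetD dados 0 "" = "S" then
    let placa := pvIntAt dados 1
    if veiculos.contains placa then
      match veiculos.get? placa with
      | none => st  -- unreachable: contains = true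
      | some pt => ((PySem.List.remove? ocupados pt).getD ocupados, veiculos.erase placa, fat)
    else st
  else st

def processa_estacionamento_alt (c : Int) (eventos : List String) : Int :=
  (eventos.foldl (pvStepB c) ([], PySem.Dict.empty, 0)).2.2

-- ===== PRECONDITION & SPEC =====

-- Pre_ excludes (i) malformed events, on which A raises (empty/whitespace-only event:
-- IndexError on dados[0]; 'C'/'S' with missing or non-integer fields: IndexError/ValueError),
-- and (ii) 'C' events with a non-positive vehicle size: there A still returns, but it charges
-- for a zero/negative-size vehicle and corrupts its free-gap list (a gap extended into
-- occupied cells), an accident of the implementation no caller would specify.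
def pvEventoOK (evento : String) : Bool :=
  let dados := (PySem.Str.split₀ evento)
  (!dados.isEmpty) &&
  (if PySem.List.pyGetD dados 0 "" = "C" then
      decide (3 ≤ dados.length) &&
      (PySem.Int.ofStr? (PySem.List.pyGetD dados 1 "")).isSome &&
      (match PySem.Int.ofStr? (PySem.List.pyGetD dados 2 "") with
       | some t => decide (1 ≤ t)
       | none => false)
   else true) &&
  (if PySem.List.pyGetD dados 0 "" = "S" then
      decide (2 ≤ dados.length) &&
      (PySem.Int.ofStr? (PySem.List.pyGetD dados 1 "")).isSome
   else true)

def Pre_processa_estacionamento (c : Int) (eventos : List String) : Prop :=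
  ∀ e ∈ eventos, pvEventoOK e = true

instance (c : Int) (eventos : List String) : Decidable (Pre_processa_estacionamento c eventos) := by
  unfold Pre_processa_estacionamento; infer_instance

def pvWitness_processa_estacionamento : Int × List String :=
  (10, ["C 5 3", "C 7 4", "S 5", "C 9 2", "S 9", "C 11 3"])

def Spec_processa_estacionamento (c : Int) (eventos : List String) (out : Int) : Prop :=
  out = processa_estacionamento_alt c eventos
instance (c : Int) (eventos : List String) (out : Int) :
    Decidable (Spec_processa_estacionamento c eventos out) := by
  unfold Spec_processa_estacionamento; infer_instance

-- ===== CLAIM (what is proved, stated in full; the proofs are below) =====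
def Claim_equal_processa_estacionamento : Prop :=
  ∀ (c : Int) (eventos : List String), Dom_processa_estacionamento c eventos →
    Pre_processa_estacionamento c eventos →
    Spec_processa_estacionamento c eventos (processa_estacionamento c eventos)

-- ===== LEMMAS AND PROOFS =====

-- the free gaps of [0, c) left of a sorted disjoint occupied list, scanning from `cur`
def pvGaps (c : Int) : Int → List (Int × Int) → List (Int × Int)
  | cur, [] => if cur < c then [(cur, c - cur)] else []
  | cur, (s, t) :: r => (if cur < s then [(cur, s - cur)] else []) ++ pvGaps c (s + t) r

-- well-formed occupied list: starts ≥ lo, sizes ≥ 1, disjoint, within [lo, c)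
def pvWF (c : Int) : Int → List (Int × Int) → Prop
  | _, [] => True
  | lo, (s, t) :: r => lo ≤ s ∧ 1 ≤ t ∧ s + t ≤ c ∧ pvWF c (s + t) r

-- gaps strictly between the intervals of the list (no trailing gap), and the end cursor
def pvInner : Int → List (Int × Int) → List (Int × Int)
  | _, [] => []
  | cur, (s, t) :: r => (if cur < s then [(cur, s - cur)] else []) ++ pvInner (s + t) r

def pvEnd : Int → List (Int × Int) → Int
  | cur, [] => cur
  | _, (s, t) :: r => pvEnd (s + t) r

def pvValInj (d : PySem.Dict Int (Int × Int)) : Prop :=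
  ∀ p q ivp ivq, d.get? p = some ivp → d.get? q = some ivq → p ≠ q → ivp ≠ ivq

-- simulation invariant between A's state and B's state
def pvInv (c : Int) (a : List Int × PySem.Dict Int (Int × Int) × List (Int × Int) × Int)
    (b : List (Int × Int) × PySem.Dict Int (Int × Int) × Int) : Prop :=
  a.2.1 = b.2.1 ∧ a.2.2.2 = b.2.2 ∧
  ((0 < c ∧ pvWF c 0 b.1 ∧ a.2.2.1 = pvGaps c 0 b.1 ∧
      (∀ p iv, b.2.1.get? p = some iv → iv ∈ b.1) ∧ pvValInj b.2.1)
   ∨ (c ≤ 0 ∧ a.2.2.1 = [(0, c)] ∧ b.1 = [] ∧ b.2.1 = PySem.Dict.empty))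

lemma pvWF_mono {c lo lo' : Int} {occ : List (Int × Int)} (h : lo' ≤ lo) (hw : pvWF c lo occ) :
    pvWF c lo' occ := by
  cases occ with
  | nil => trivial
  | cons x r => obtain ⟨h1, h2⟩ := hw; exact ⟨by omega, h2⟩

lemma pvWF_facts {c lo : Int} {occ : List (Int × Int)} (hw : pvWF c lo occ) :
    ∀ iv ∈ occ, lo ≤ iv.1 ∧ 1 ≤ iv.2 ∧ iv.1 + iv.2 ≤ c := by
  induction occ generalizing lo with
  | nil => intro iv h; cases h
  | cons x r ih =>
    obtain ⟨x1, x2⟩ := x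
    obtain ⟨h1, h2, h3, h4⟩ := hw
    intro iv hiv
    rcases List.mem_cons.1 hiv with h | h
    · subst h; exact ⟨h1, h2, h3⟩
    · have := ih h4 iv h; exact ⟨by omega, this.2⟩

lemma pvGaps_facts {c cur : Int} {occ : List (Int × Int)} (hw : pvWF c cur occ) :
    ∀ g ∈ pvGaps c cur occ, cur ≤ g.1 ∧ 1 ≤ g.2 ∧ g.1 + g.2 ≤ c := by
  induction occ generalizing cur with
  | nil =>
    intro g hg
    simp only [pvGaps] at hg
    split at hg
    · rcases List.mem_singleton.1 hg with h; subst h; simp; omega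
    · cases hg
  | cons x r ih =>
    obtain ⟨s, t⟩ := x
    obtain ⟨h1, h2, h3, h4⟩ := hw
    intro g hg
    simp only [pvGaps, List.mem_append] at hg
    rcases hg with hg | hg
    · split at hg
      · rcases List.mem_singleton.1 hg with h; subst h; simp; omega
      · cases hg
    · have := ih h4 g hg; exact ⟨by omega, this.2⟩

lemma pvGaps_pairwise {c cur : Int} {occ : List (Int × Int)} (hw : pvWF c cur occ) :
    (pvGaps c cur occ).Pairwise (fun a b => a.1 < b.1) := by
  induction occ generalizing cur with
  | nil =>
    simp only [pvGaps]; split <;> simp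
  | cons x r ih =>
    obtain ⟨s, t⟩ := x
    obtain ⟨h1, h2, h3, h4⟩ := hw
    simp only [pvGaps]
    refine List.pairwise_append.2 ⟨?_, ih h4, ?_⟩
    · split <;> simp
    · intro g hg g' hg'
      have hf := pvGaps_facts h4 g' hg'
      split at hg
      · rcases List.mem_singleton.1 hg with h; subst h; simp at hf ⊢; omega
      · cases hg

-- FIT: first fit over the gap list = first fit over the occupied list, and the updated
-- occupied list's gaps are exactly A's updated gap list
lemma pvFit_eq {c t : Int} (ht : 1 ≤ t) :
    ∀ (occ : List (Int × Int)) (cur : Int), pvWF c cur occ →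
      pvFitA (pvGaps c cur occ) t
        = (pvEstaciona occ c cur t).map (fun r => (r.1, pvGaps c cur r.2)) := by
  intro occ
  induction occ with
  | nil =>
    intro cur _
    by_cases hfit : c - cur ≥ t
    · have hcc : cur < c := by omega
      by_cases hrem : cur + t < c
      · simp [pvGaps, pvEstaciona, pvFitA, hfit, hcc, hrem]
        rw [if_pos (show t < c - cur by omega)]
        simp
        omega
      · simp [pvGaps, pvEstaciona, pvFitA, hfit, hcc, hrem]
        omega

    · by_cases hcc : cur < c
      · simp [pvGaps, pvEstaciona, pvFitA, hfit, hcc]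

      · simp [pvGaps, pvEstaciona, pvFitA, hfit, hcc]

  | cons x resto ih =>
    obtain ⟨s, u⟩ := x
    intro cur hw
    obtain ⟨h1, h2, h3, h4⟩ := hw
    by_cases hfit : s - cur ≥ t
    · have hcs : cur < s := by omega
      by_cases hrem : cur + t < s
      · simp [pvGaps, pvEstaciona, pvFitA, hfit, hcs, hrem]
        rw [if_pos (show t < s - cur by omega)]
        simp
        omega
      · simp [pvGaps, pvEstaciona, pvFitA, hfit, hcs, hrem]
        omega

    · rcases h : pvEstaciona resto c (s + u) t with _ | ⟨p, occ''⟩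
      · by_cases hcs : cur < s
        · simp [pvGaps, pvEstaciona, pvFitA, hfit, hcs, ih (s + u) h4, h]

        · simp [pvGaps, pvEstaciona, pvFitA, hfit, hcs, ih (s + u) h4, h]

      · by_cases hcs : cur < s
        · simp [pvGaps, pvEstaciona, pvFitA, hfit, hcs, ih (s + u) h4, h]

        · have hcs' : cur = s := by omega
          subst hcs'
          simp [pvGaps, pvEstaciona, pvFitA, hfit, ih (cur + u) h4, h]
          exact ⟨(cur, u) :: occ'', by rw [if_neg (by omega)], by simp [pvGaps]⟩

lemma pvEstaciona_wf {c t : Int} (ht : 1 ≤ t) :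
    ∀ (occ : List (Int × Int)) (cur p : Int) (occ' : List (Int × Int)), pvWF c cur occ →
      pvEstaciona occ c cur t = some (p, occ') →
      pvWF c cur occ' ∧ (∀ iv, iv ∈ occ' ↔ iv = (p, t) ∨ iv ∈ occ) ∧ (p, t) ∉ occ ∧ cur ≤ p := by
  intro occ
  induction occ with
  | nil =>
    intro cur p occ' _ hsome
    simp only [pvEstaciona] at hsome
    split at hsome
    · injection hsome with hh
      injection hh with hp ho
      subst hp; subst ho
      refine ⟨⟨le_refl _, ht, by omega, trivial⟩, by simp, by simp, le_refl _⟩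
    · cases hsome
  | cons x resto ih =>
    obtain ⟨s, u⟩ := x
    intro cur p occ' hw hsome
    obtain ⟨h1, h2, h3, h4⟩ := hw
    simp only [pvEstaciona] at hsome
    split at hsome
    · rename_i hfit
      injection hsome with hh
      injection hh with hp ho
      subst hp; subst ho
      have hresto := pvWF_facts h4
      refine ⟨⟨le_refl _, ht, by omega, by omega, h2, h3, h4⟩, by simp, ?_, le_refl _⟩
      intro hmem
      rcases List.mem_cons.1 hmem with hx | hx
      · have : cur = s := congrArg Prod.fst hx
        omega
      · have := hresto _ hx
        simp at this; omega
    · rename_i hfit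
      rcases h : pvEstaciona resto c (s + u) t with _ | ⟨q, occ''⟩
      · rw [h] at hsome; cases hsome
      · rw [h] at hsome
        simp only [Option.map_some] at hsome
        injection hsome with hh
        injection hh with hp ho
        subst hp; subst ho
        obtain ⟨hwf', hiff, hnm, hle⟩ := ih (s + u) q occ'' h4 h
        refine ⟨⟨h1, h2, h3, hwf'⟩, ?_, ?_, by omega⟩
        · intro iv
          simp only [List.mem_cons, hiff]
          tauto
        · intro hmem
          rcases List.mem_cons.1 hmem with hx | hx
          · have : q = s := congrArg Prod.fst hx
            omega
          · exact hnm hx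

lemma pvGaps_decomp (c : Int) : ∀ (L R : List (Int × Int)) (cur : Int),
    pvGaps c cur (L ++ R) = pvInner cur L ++ pvGaps c (pvEnd cur L) R := by
  intro L
  induction L with
  | nil => intro R cur; simp [pvInner, pvEnd]
  | cons x L ih =>
    obtain ⟨s, t⟩ := x
    intro R cur
    simp only [List.cons_append, pvGaps, pvInner, pvEnd, ih, List.append_assoc]

def pvHeadStart (c : Int) (R : List (Int × Int)) : Int :=
  match R with | [] => c | (s, _) :: _ => s

def pvTailGaps (c : Int) (R : List (Int × Int)) : List (Int × Int) :=
  match R with | [] => [] | (s, u) :: r => pvGaps c (s + u) r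

-- a merge-loop pass over gaps that touch neither side of (p, t) just appends them
lemma pvMergeFold_append :
    ∀ (gs nova : List (Int × Int)) (p tam : Int),
      (∀ g ∈ gs, g.1 ≠ p + tam ∧ p ≠ g.1 + g.2) →
      gs.foldl pvMergeStep (nova, p, tam) = (nova ++ gs, p, tam) := by
  intro gs
  induction gs with
  | nil => intro nova p tam _; simp
  | cons g gs ih =>
    intro nova p tam h
    have hg := h g (by simp)
    simp only [List.foldl_cons, pvMergeStep, if_neg hg.1, if_neg hg.2]
    rw [ih (nova ++ [g]) p tam (fun g' hg' => h g' (by simp [hg']))]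
    simp

lemma pvWF_mid {c lo pos t : Int} {L R : List (Int × Int)}
    (hw : pvWF c lo (L ++ (pos, t) :: R)) : lo ≤ pos :=
  (pvWF_facts hw (pos, t) (by simp)).1

-- MERGE: A's departure loop + append + sort, run on the gaps of occ = L ++ (pos,t) :: R,
-- yields exactly the gaps of L ++ R
lemma pvMerge_eq {c pos t : Int} (R : List (Int × Int)) :
    ∀ (L : List (Int × Int)) (cur : Int) (nova : List (Int × Int)),
      pvWF c cur (L ++ (pos, t) :: R) →
      (pvGaps c cur (L ++ (pos, t) :: R)).foldl pvMergeStep (nova, pos, t)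
        = (nova ++ pvInner cur L ++ pvTailGaps c R, pvEnd cur L,
           pvHeadStart c R - pvEnd cur L) := by
  intro L
  induction L with
  | nil =>
    intro cur nova hw
    obtain ⟨h1, h2, h3, h4⟩ := hw
    simp only [List.nil_append, pvGaps, pvInner, pvEnd, List.foldl_append, List.append_nil]
    have hfirst : (if cur < pos then [(cur, pos - cur)] else []).foldl pvMergeStep (nova, pos, t)
        = (nova, cur, pos + t - cur) := by
      by_cases hc : cur < pos
      · rw [if_pos hc]
        simp only [List.foldl_cons, List.foldl_nil, pvMergeStep,
          if_neg (show ¬((cur, pos - cur).1 = pos + t) by simp <;> omega),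
          if_pos (show pos = (cur, pos - cur).1 + (cur, pos - cur).2 by simp)]
        simp <;> omega
      · rw [if_neg hc]
        have : cur = pos := by omega
        subst this
        simp
    rw [hfirst]
    match R, h4 with
    | [], h4 =>
      simp only [pvGaps, pvTailGaps, pvHeadStart]
      by_cases hc : pos + t < c
      · rw [if_pos hc]
        simp only [List.foldl_cons, List.foldl_nil, pvMergeStep,
          if_pos (show (pos + t, c - (pos + t)).1 = cur + (pos + t - cur) by simp <;> omega)]
        simp <;> omega
      · simp only [if_neg hc, List.foldl_nil]
        simp <;> omega
    | (s1, u1) :: r, h4 =>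
      obtain ⟨hs1, hu1, hsu, hr⟩ := h4
      simp only [pvGaps, pvTailGaps, pvHeadStart, List.foldl_append]
      have hsecond : (if pos + t < s1 then [(pos + t, s1 - (pos + t))] else []).foldl
          pvMergeStep (nova, cur, pos + t - cur) = (nova, cur, s1 - cur) := by
        by_cases hc : pos + t < s1
        · rw [if_pos hc]
          simp only [List.foldl_cons, List.foldl_nil, pvMergeStep,
            if_pos (show (pos + t, s1 - (pos + t)).1 = cur + (pos + t - cur) by simp <;> omega)]
          simp <;> omega
        · rw [if_neg hc]
          simp only [List.foldl_nil]
          have : pos + t = s1 := by omega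
          simp [this]
      have happ := pvMergeFold_append (pvGaps c (s1 + u1) r) nova cur (s1 - cur) (by
        intro g hg
        obtain ⟨ha, hb, hc2⟩ := pvGaps_facts hr g hg
        exact ⟨by omega, by omega⟩)
      rw [hsecond, happ]
  | cons x L ih =>
    obtain ⟨s, u⟩ := x
    intro cur nova hw
    obtain ⟨h1, h2, h3, h4⟩ := hw
    have hpos : s + u ≤ pos := pvWF_mid h4
    have hmid := pvWF_facts h4 (pos, t) (by simp)
    simp only [List.cons_append, pvGaps, pvInner, pvEnd, List.foldl_append]
    have hfirst : (if cur < s then [(cur, s - cur)] else []).foldl pvMergeStep (nova, pos, t)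
        = (nova ++ (if cur < s then [(cur, s - cur)] else []), pos, t) := by
      by_cases hc : cur < s
      · rw [if_pos hc]
        simp only [List.foldl_cons, List.foldl_nil, pvMergeStep,
          if_neg (show ¬((cur, s - cur).1 = pos + t) by simp at hmid ⊢; omega),
          if_neg (show ¬(pos = (cur, s - cur).1 + (cur, s - cur).2) by simp <;> omega)]
      · rw [if_neg hc]; simp
    rw [hfirst, ih (s + u) (nova ++ (if cur < s then [(cur, s - cur)] else [])) h4]
    simp [List.append_assoc]

def pvLex (a b : Int × Int) : Bool :=
  decide (a.1 < b.1) || (!decide (b.1 < a.1) && decide (a.2 < b.2))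

lemma pvInsertBy_perm {α : Type} (before : α → α → Bool) (x : α) :
    ∀ ys : List α, (PySem.List.insertBy before x ys).Perm (x :: ys) := by
  intro ys
  induction ys with
  | nil => simp [PySem.List.insertBy]
  | cons y ys ih =>
    simp only [PySem.List.insertBy]
    split
    · exact List.Perm.refl _
    · exact (ih.cons y).trans (List.Perm.swap x y ys)

lemma pvInsertBy_pairwise (x : Int × Int) :
    ∀ acc : List (Int × Int), (∀ y ∈ acc, y.1 ≠ x.1) →
      acc.Pairwise (fun a b => a.1 < b.1) →
      (PySem.List.insertBy pvLex x acc).Pairwise (fun a b => a.1 < b.1) := by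
  intro acc
  induction acc with
  | nil => intro _ _; simp [PySem.List.insertBy]
  | cons y ys ih =>
    intro hne hs
    have hyx : y.1 ≠ x.1 := hne y (by simp)
    simp only [PySem.List.insertBy]
    rcases List.pairwise_cons.1 hs with ⟨hy, hys⟩
    split
    · rename_i hbef
      have hxy : x.1 < y.1 := by
        simp only [pvLex, Bool.or_eq_true, Bool.and_eq_true, decide_eq_true_eq,
          Bool.not_eq_eq_eq_not, Bool.not_true, decide_eq_false_iff_not] at hbef
        rcases hbef with h | ⟨h, _⟩ <;> omega
      exact List.pairwise_cons.2 ⟨by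
        intro z hz
        rcases List.mem_cons.1 hz with rfl | hz
        · exact hxy
        · exact lt_trans hxy (hy z hz), hs⟩
    · rename_i hbef
      have hxy : y.1 < x.1 := by
        simp only [pvLex, Bool.or_eq_true, Bool.and_eq_true, decide_eq_true_eq,
          Bool.not_eq_eq_eq_not, Bool.not_true, decide_eq_false_iff_not] at hbef
        push Not at hbef
        omega
      refine List.pairwise_cons.2 ⟨?_, ih (fun z hz => hne z (by simp [hz])) hys⟩
      intro z hz
      rcases List.mem_cons.1 ((List.Perm.mem_iff (pvInsertBy_perm pvLex x ys)).1 hz) with rfl | h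
      · exact hxy
      · exact hy z h

lemma pvFoldIns_pairwise :
    ∀ (xs acc : List (Int × Int)),
      (∀ y ∈ acc, ∀ z ∈ xs, y.1 ≠ z.1) →
      xs.Pairwise (fun a b => a.1 ≠ b.1) →
      acc.Pairwise (fun a b => a.1 < b.1) →
      (xs.foldl (fun acc x => PySem.List.insertBy pvLex x acc) acc).Pairwise
        (fun a b => a.1 < b.1) := by
  intro xs
  induction xs with
  | nil => intro acc _ _ h; simpa using h
  | cons x xs ih =>
    intro acc hax hxs hacc
    rcases List.pairwise_cons.1 hxs with ⟨hx, hxs'⟩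
    simp only [List.foldl_cons]
    refine ih _ ?_ hxs' (pvInsertBy_pairwise x acc (fun y hy => hax y hy x (by simp)) hacc)
    intro y hy z hz
    rcases List.mem_cons.1 ((List.Perm.mem_iff (pvInsertBy_perm pvLex x acc)).1 hy) with rfl | h
    · exact hx z hz
    · exact hax y h z (by simp [hz])

lemma pvSorted2_eq_of_perm {xs ys : List (Int × Int)} (hp : ys.Perm xs)
    (hs : ys.Pairwise (fun a b => a.1 < b.1)) :
    PySem.List.sorted2 xs (·.1) (·.2) false = ys := by
  have hys_ne : ys.Pairwise (fun a b : Int × Int => a.1 ≠ b.1) :=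
    hs.imp (fun h => by omega)
  have hxs_ne : xs.Pairwise (fun a b : Int × Int => a.1 ≠ b.1) :=
    (List.Perm.pairwise_iff (by intro a b h; exact h.symm) hp).1 hys_ne
  have heq : PySem.List.sorted2 xs (·.1) (·.2) false
      = xs.foldl (fun acc x => PySem.List.insertBy pvLex x acc) [] := rfl
  have hpw : (PySem.List.sorted2 xs (·.1) (·.2) false).Pairwise (fun a b => a.1 < b.1) := by
    rw [heq]
    exact pvFoldIns_pairwise xs [] (by simp) hxs_ne (by simp)
  refine List.Perm.eq_of_pairwise ?_ hpw hs ?_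
  · intro a b _ _ hab hba; exfalso; omega
  · exact (PySem.List.sorted2_perm xs _ _ false).trans hp.symm

lemma pvGet?_erase (d : PySem.Dict Int (Int × Int)) (k q : Int) :
    (d.erase k).get? q = if q = k then none else d.get? q := by
  obtain ⟨items⟩ := d
  simp only [PySem.Dict.erase, PySem.Dict.get?]
  induction items with
  | nil => simp
  | cons p rest ih =>
    simp only [List.filter_cons]
    by_cases hpk : p.1 = k
    · have h1 : (!p.1 == k) = false := by simp [hpk]
      rw [h1, if_neg (by simp : ¬ (false = true)), ih]
      by_cases hqk : q = k
      · rw [if_pos hqk, if_pos hqk]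
      · have h2 : (p.1 == q) = false := by simp; omega
        rw [if_neg hqk, if_neg hqk, List.find?_cons, h2]
    · have h1 : (!p.1 == k) = true := by simp [hpk]
      rw [h1, if_pos rfl, List.find?_cons, List.find?_cons]
      by_cases hpq : p.1 = q
      · have hqk : ¬ q = k := by omega
        have h2 : (p.1 == q) = true := by simp [hpq]
        rw [h2, if_neg hqk]
      · have h2 : (p.1 == q) = false := by simp [hpq]
        rw [h2, ih]

-- starts strictly increase along a well-formed list, so the marked element is not in L
lemma pvWF_notmem {c : Int} {x : Int × Int} :
    ∀ {L R : List (Int × Int)} {lo : Int}, pvWF c lo (L ++ x :: R) → x ∉ L := by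
  intro L
  induction L with
  | nil => intro R lo _; simp
  | cons y L ih =>
    intro R lo hw
    obtain ⟨h1, h2, h3, h4⟩ := hw
    intro hmem
    rcases List.mem_cons.1 hmem with rfl | hmem
    · have := pvWF_mid h4
      omega
    · exact ih h4 hmem

lemma pvWF_drop {c : Int} :
    ∀ (L R : List (Int × Int)) (lo : Int), pvWF c lo (L ++ R) → pvWF c (pvEnd lo L) R := by
  intro L
  induction L with
  | nil => intro R lo h; exact h
  | cons y L ih =>
    obtain ⟨s, u⟩ := y
    intro R lo hw
    obtain ⟨h1, h2, h3, h4⟩ := hw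
    exact ih R (s + u) h4

lemma pvWF_erase {c : Int} {x : Int × Int} :
    ∀ (L R : List (Int × Int)) (lo : Int), pvWF c lo (L ++ x :: R) → pvWF c lo (L ++ R) := by
  intro L
  induction L with
  | nil =>
    intro R lo hw
    obtain ⟨h1, h2, h3, h4⟩ := hw
    exact pvWF_mono (by omega) h4
  | cons y L ih =>
    obtain ⟨s, u⟩ := y
    intro R lo hw
    obtain ⟨h1, h2, h3, h4⟩ := hw
    exact ⟨h1, h2, h3, ih R (s + u) h4⟩

-- gap list of L ++ R exposes the (single, maximal) gap replacing the erased interval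
lemma pvGaps_LR {c pos t : Int} {L R : List (Int × Int)}
    (hw : pvWF c 0 (L ++ (pos, t) :: R)) (hc : 0 < c) :
    pvGaps c 0 (L ++ R)
      = pvInner 0 L ++ ((pvEnd 0 L, pvHeadStart c R - pvEnd 0 L) :: pvTailGaps c R) := by
  rw [pvGaps_decomp]
  congr 1
  have hmidwf := pvWF_drop L ((pos, t) :: R) 0 hw
  obtain ⟨hle, ht, hptc, hR⟩ := hmidwf
  match R, hR with
  | [], _ =>
    simp only [pvGaps, pvTailGaps, pvHeadStart]
    rw [if_pos (by omega)]
  | (s1, u1) :: r, hR =>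
    obtain ⟨hs1, hu1, hsu, hr⟩ := hR
    simp only [pvGaps, pvTailGaps, pvHeadStart]
    rw [if_pos (by omega)]
    simp

lemma pvStep_inv {c : Int} {a b} (hinv : pvInv c a b) {e : String} (he : pvEventoOK e = true) :
    pvInv c (pvStepA c a e) (pvStepB c b e) := by
  obtain ⟨est, vehA, gaps, fatA⟩ := a
  obtain ⟨occ, vehB, fatB⟩ := b
  obtain ⟨hveh, hfat, hrest⟩ := hinv
  simp only at hveh hfat hrest
  subst hveh hfat
  simp only [pvEventoOK, Bool.and_eq_true] at he
  obtain ⟨⟨hne, heC⟩, heS⟩ := he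
  by_cases hC : PySem.List.pyGetD (PySem.Str.split₀ e) 0 "" = "C"
  · -- C event
    rw [if_pos hC] at heC
    simp only [Bool.and_eq_true, decide_eq_true_eq] at heC
    obtain ⟨⟨hlen, hp1⟩, hp2⟩ := heC
    have ht : 1 ≤ pvIntAt (PySem.Str.split₀ e) 2 := by
      unfold pvIntAt
      rcases h2 : PySem.Int.ofStr? (PySem.List.pyGetD (PySem.Str.split₀ e) 2 "") with _ | t0
      · rw [h2] at hp2; cases hp2
      · rw [h2] at hp2; simp at hp2 ⊢; omega
    set tam := pvIntAt (PySem.Str.split₀ e) 2 with htam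
    set placa := pvIntAt (PySem.Str.split₀ e) 1 with hplaca
    rcases hrest with ⟨hc, hwf, hgaps, hmem, hinj⟩ | ⟨hc, hgaps, hocc, hempty⟩
    · -- 0 < c
      have hfit := pvFit_eq (c := c) ht occ 0 hwf
      rcases hest : pvEstaciona occ c 0 tam with _ | ⟨p, occ'⟩
      · simp only [pvStepA, pvStepB, hC, String.reduceEq, reduceIte, ← htam, ← hplaca, hgaps, hfit, hest, Option.map_none]
        exact ⟨rfl, rfl, Or.inl ⟨hc, hwf, rfl, hmem, hinj⟩⟩
      · obtain ⟨hwf', hiff, hnm, hle⟩ := pvEstaciona_wf ht occ 0 p occ' hwf hest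
        simp only [pvStepA, pvStepB, hC, String.reduceEq, reduceIte, ← htam, ← hplaca, hgaps, hfit, hest, Option.map_some]
        refine ⟨rfl, rfl, Or.inl ⟨hc, hwf', rfl, ?_, ?_⟩⟩
        · intro q iv hq
          rw [PySem.Dict.get?_insert] at hq
          split at hq
          · exact (hiff iv).2 (Or.inl (Option.some.inj hq).symm)
          · exact (hiff iv).2 (Or.inr (hmem q iv hq))
        · intro q1 q2 iv1 iv2 hq1 hq2 hne12
          rw [PySem.Dict.get?_insert] at hq1 hq2
          split at hq1 <;> split at hq2
          · rename_i e1 e2; exact absurd (e1.trans e2.symm) hne12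
          · intro heq
            have hiv1 : iv1 = (p, tam) := (Option.some.inj hq1).symm
            apply hnm
            have h5 := hmem q2 iv2 hq2
            rw [← heq, hiv1] at h5
            exact h5
          · intro heq
            have hiv2 : iv2 = (p, tam) := (Option.some.inj hq2).symm
            apply hnm
            have h5 := hmem q1 iv1 hq1
            rw [heq, hiv2] at h5
            exact h5
          · exact hinj q1 q2 iv1 iv2 hq1 hq2 hne12
    · -- c ≤ 0 : no car ever fits
      have hfitA : pvFitA gaps tam = none := by
        rw [hgaps]
        simp only [pvFitA]
        rw [if_neg (by omega)]
        simp [pvFitA]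
      have hfitB : pvEstaciona occ c 0 tam = none := by
        rw [hocc]
        simp only [pvEstaciona]
        rw [if_neg (by omega)]
      simp only [pvStepA, pvStepB, hC, String.reduceEq, reduceIte, ← htam, ← hplaca, hfitA, hfitB]
      exact ⟨rfl, rfl, Or.inr ⟨hc, hgaps, hocc, hempty⟩⟩
  · by_cases hS : PySem.List.pyGetD (PySem.Str.split₀ e) 0 "" = "S"
    · -- S event
      set placa := pvIntAt (PySem.Str.split₀ e) 1 with hplaca
      by_cases hcont : vehA.contains placa = true
      · rcases hget : vehA.get? placa with _ | pt
        · have hiso := PySem.Dict.contains_eq_isSome_get? (d := vehA) (k := placa)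
          rw [hget] at hiso
          rw [hiso] at hcont
          cases hcont
        · obtain ⟨pos, t⟩ := pt
          rcases hrest with ⟨hc, hwf0, hgaps, hmem, hinj⟩ | ⟨hc, hgaps, hocc, hempty⟩
          · -- 0 < c
            have hptocc : (pos, t) ∈ occ := hmem placa (pos, t) hget
            obtain ⟨L, R, hLRdec⟩ := List.append_of_mem hptocc
            subst hLRdec
            have hwf : pvWF c 0 (L ++ (pos, t) :: R) := hwf0
            have hnotL : (pos, t) ∉ L := pvWF_notmem hwf
            have hermB : (PySem.List.remove? (L ++ (pos, t) :: R) (pos, t)).getD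
                (L ++ (pos, t) :: R) = L ++ R := by
              rw [PySem.List.remove?_eq_some_erase (L ++ (pos, t) :: R) (pos, t) (by simp)]
              simp only [Option.getD_some]
              rw [List.erase_append_right _ hnotL, List.erase_cons_head]
            have hmerge := pvMerge_eq (c := c) (pos := pos) (t := t) R L 0 [] hwf
            have hwfLR : pvWF c 0 (L ++ R) := pvWF_erase L R 0 hwf
            have hLRgaps := pvGaps_LR hwf hc
            have hperm : (pvGaps c 0 (L ++ R)).Perm
                ((pvInner 0 L ++ pvTailGaps c R) ++
                  [(pvEnd 0 L, pvHeadStart c R - pvEnd 0 L)]) := by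
              rw [hLRgaps, List.append_assoc]
              exact List.Perm.append_left _ ((List.perm_append_singleton _ _).symm)
            have hpw : (pvGaps c 0 (L ++ R)).Pairwise (fun a b => a.1 < b.1) :=
              pvGaps_pairwise hwfLR
            have hsorted : PySem.List.sorted2
                (((pvGaps c 0 (L ++ (pos, t) :: R)).foldl pvMergeStep ([], pos, t)).1 ++
                  [((((pvGaps c 0 (L ++ (pos, t) :: R)).foldl pvMergeStep ([], pos, t)).2.1),
                    (((pvGaps c 0 (L ++ (pos, t) :: R)).foldl pvMergeStep ([], pos, t)).2.2))])
                (·.1) (·.2) false = pvGaps c 0 (L ++ R) := by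
              rw [hmerge]
              simp only [List.nil_append]
              exact pvSorted2_eq_of_perm hperm hpw
            simp only [pvStepA, pvStepB, hC, hS, String.reduceEq, reduceIte, ← hplaca, hcont, hget, hgaps, hermB]
            refine ⟨rfl, rfl, Or.inl ⟨hc, hwfLR, hsorted, ?_, ?_⟩⟩
            · intro q iv hq
              rw [pvGet?_erase] at hq
              split at hq
              · cases hq
              · rename_i hqp
                have hivocc := hmem q iv hq
                have hivne : iv ≠ (pos, t) := hinj q placa iv (pos, t) hq hget hqp
                simp only [List.mem_append, List.mem_cons] at hivocc ⊢
                rcases hivocc with h | h | h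
                · exact Or.inl h
                · exact absurd h hivne
                · exact Or.inr h
            · intro q1 q2 iv1 iv2 hq1 hq2 hne12
              rw [pvGet?_erase] at hq1 hq2
              split at hq1
              · cases hq1
              · split at hq2
                · cases hq2
                · exact hinj q1 q2 iv1 iv2 hq1 hq2 hne12
          · -- c ≤ 0 : vehicles dict is empty, contradiction with contains
            rw [hempty] at hcont
            simp [PySem.Dict.contains, PySem.Dict.empty] at hcont
      · simp only [pvStepA, pvStepB, hC, hS, String.reduceEq, reduceIte, ← hplaca, hcont]
        exact ⟨rfl, rfl, hrest⟩
    · -- other events: both no-ops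
      simp only [pvStepA, pvStepB, hC, hS, reduceIte]
      exact ⟨rfl, rfl, hrest⟩

lemma pvFold_inv {c : Int} :
    ∀ (ev : List String) a b, (∀ e ∈ ev, pvEventoOK e = true) → pvInv c a b →
      pvInv c (ev.foldl (pvStepA c) a) (ev.foldl (pvStepB c) b) := by
  intro ev
  induction ev with
  | nil => intro a b _ h; exact h
  | cons e ev ih =>
    intro a b hok hinv
    simp only [List.foldl_cons]
    exact ih _ _ (fun e' he' => hok e' (by simp [he'])) (pvStep_inv hinv (hok e (by simp)))

theorem pv_main (c : Int) (eventos : List String)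
    (hpre : Pre_processa_estacionamento c eventos) :
    processa_estacionamento c eventos = processa_estacionamento_alt c eventos := by
  unfold processa_estacionamento processa_estacionamento_alt
  have hinit : pvInv c (List.replicate c.toNat 0, PySem.Dict.empty, [(0, c)], 0)
      ([], PySem.Dict.empty, 0) := by
    refine ⟨rfl, rfl, ?_⟩
    by_cases hc : 0 < c
    · refine Or.inl ⟨hc, trivial, ?_, ?_, ?_⟩
      · simp only [pvGaps]
        rw [if_pos (by omega)]
        simp
      · intro p iv hp
        simp [PySem.Dict.get?, PySem.Dict.empty] at hp
      · intro q1 q2 iv1 iv2 hq1 _ _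
        simp [PySem.Dict.get?, PySem.Dict.empty] at hq1
    · exact Or.inr ⟨by omega, rfl, rfl, rfl⟩
  have h := pvFold_inv eventos _ _ hpre hinit
  exact h.2.1

-- ===== VERDICT (by name: the statement is the Claim_ definition above) =====
theorem processa_estacionamento_spec : Claim_equal_processa_estacionamento := by
  intro c eventos _ hpre
  unfold Spec_processa_estacionamento
  exact pv_main c eventos hpre
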